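-- pv_equiv track=rewrite | github.com/Pratik129191/Quantum | Mapping_in_Hexagonal_Architecture/graph_functions.py | get_all_ancilla_bits_per_graph
-- ===== SOURCE A (Python) =====
-- def get_ancilla_name(index):
--     return str(str("A") + str(index))
--
-- def ancilla_bits_are_possible(qbits: list):
--     if len(qbits) - 2 > 0:
--         return True
--     return False
--
-- def get_all_ancilla_bits_per_graph(graphs: list, qbit_names: list):
--     ancilla_names = []
--     for g in range(0, len(graphs)):
--         if ancilla_bits_are_possible(qbit_names[g]):
--             no_of_ancilla = len(qbit_names[g]) - 2
--             temp = []
--             for i in range(0, no_of_ancilla):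
--                 temp.append(get_ancilla_name(i+1))
--             ancilla_names.append(temp)
--         else:
--             ancilla_names.append(None)
--     return ancilla_names
-- ===== SOURCE B (Python) =====
-- def get_all_ancilla_bits_per_graph(graphs: list, qbit_names: list):
--     sizes = [len(qbit_names[g]) - 2 for g in range(len(graphs))]
--     m = max(sizes) if sizes else 0
--     full = ['A' + str(i) for i in range(1, m + 1)]
--     return [full[:n] if n > 0 else None for n in sizes]
-- ===== Notes on version B (the rewrite author's own statement) =====
-- stated objective: alternative
-- what changed: Instead of building each graph's ancilla name list with a per-graph inner append loop, B computes all sizes in one pass, builds a single shared template ['A1'..'AM'] for the maximum size, and emits a fresh slice of it per graph.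
import Mathlib
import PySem

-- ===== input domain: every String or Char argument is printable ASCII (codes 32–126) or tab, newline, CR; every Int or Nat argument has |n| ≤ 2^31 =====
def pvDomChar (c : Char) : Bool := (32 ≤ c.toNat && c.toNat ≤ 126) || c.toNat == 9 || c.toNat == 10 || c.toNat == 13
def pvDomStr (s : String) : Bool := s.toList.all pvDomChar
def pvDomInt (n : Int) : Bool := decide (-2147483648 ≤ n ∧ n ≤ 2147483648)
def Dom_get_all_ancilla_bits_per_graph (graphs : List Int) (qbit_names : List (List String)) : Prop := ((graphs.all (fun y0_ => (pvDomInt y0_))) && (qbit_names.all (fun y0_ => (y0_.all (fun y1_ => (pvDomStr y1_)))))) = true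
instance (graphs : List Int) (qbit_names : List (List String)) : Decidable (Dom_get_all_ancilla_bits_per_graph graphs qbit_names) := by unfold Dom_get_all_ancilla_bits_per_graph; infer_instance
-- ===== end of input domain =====

-- B replaces A's per-graph inner append loop by one shared template list ['A1'..'AM'] (M = max size) sliced per graph; equivalence proved on inputs where Python A raises no IndexError.


-- ===== PORT A =====
def get_ancilla_name (index : Int) : String := "A" ++ PySem.Int.toStr index

def ancilla_bits_are_possible (qbits : List String) : Bool :=
  if (qbits.length : Int) - 2 > 0 then true else false

def get_all_ancilla_bits_per_graph (graphs : List Int) (qbit_names : List (List String)) : List (Option (List String)) :=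
  (PySem.List.pyRange 0 graphs.length 1).foldl (fun ancilla_names g =>
    let q := PySem.List.pyGetD qbit_names g []   -- qbit_names[g]; in range under Pre_
    if ancilla_bits_are_possible q then
      let no_of_ancilla := (q.length : Int) - 2
      let temp := (PySem.List.pyRange 0 no_of_ancilla 1).foldl
        (fun t i => t ++ [get_ancilla_name (i + 1)]) []
      ancilla_names ++ [some temp]
    else
      ancilla_names ++ [none]) []

-- ===== PORT B =====
def get_all_ancilla_bits_per_graph_alt (graphs : List Int) (qbit_names : List (List String)) : List (Option (List String)) :=
  let sizes := (PySem.List.pyRange 0 graphs.length 1).map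
    (fun g => ((PySem.List.pyGetD qbit_names g []).length : Int) - 2)
  let m := (PySem.List.max? sizes (fun x => x)).getD 0     -- max(sizes) if sizes else 0
  let full := (PySem.List.pyRange 1 (m + 1) 1).map (fun i => "A" ++ PySem.Int.toStr i)
  sizes.map (fun n => if n > 0 then some (PySem.List.slice full none (some n)) else none)

-- ===== PRECONDITION & SPEC =====
-- Pre_ excludes exactly the inputs where Python A raises IndexError: qbit_names shorter than graphs.
def Pre_get_all_ancilla_bits_per_graph (graphs : List Int) (qbit_names : List (List String)) : Prop :=
  graphs.length ≤ qbit_names.length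
instance (graphs : List Int) (qbit_names : List (List String)) : Decidable (Pre_get_all_ancilla_bits_per_graph graphs qbit_names) := by unfold Pre_get_all_ancilla_bits_per_graph; infer_instance

def pvWitness_get_all_ancilla_bits_per_graph : List Int × List (List String) :=
  ([7, 8], [["a", "b", "c", "d"], ["x"]])

def Spec_get_all_ancilla_bits_per_graph (graphs : List Int) (qbit_names : List (List String)) (out : List (Option (List String))) : Prop := out = get_all_ancilla_bits_per_graph_alt graphs qbit_names
instance (graphs : List Int) (qbit_names : List (List String)) (out : List (Option (List String))) : Decidable (Spec_get_all_ancilla_bits_per_graph graphs qbit_names out) := by unfold Spec_get_all_ancilla_bits_per_graph; infer_instance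

-- ===== CLAIM (what is proved, stated in full; the proofs are below) =====
def Claim_equal_get_all_ancilla_bits_per_graph : Prop := ∀ (graphs : List Int) (qbit_names : List (List String)), Dom_get_all_ancilla_bits_per_graph graphs qbit_names → Pre_get_all_ancilla_bits_per_graph graphs qbit_names → Spec_get_all_ancilla_bits_per_graph graphs qbit_names (get_all_ancilla_bits_per_graph graphs qbit_names)

-- ===== LEMMAS AND PROOFS =====

-- A's outer loop is an append-singleton fold: it is the map of its per-graph body.
theorem aLoop_eq_map (qbit_names : List (List String)) (l : List Int) (acc : List (Option (List String))) :
    l.foldl (fun ancilla_names g =>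
      let q := PySem.List.pyGetD qbit_names g []
      if ancilla_bits_are_possible q then
        let no_of_ancilla := (q.length : Int) - 2
        let temp := (PySem.List.pyRange 0 no_of_ancilla 1).foldl
          (fun t i => t ++ [get_ancilla_name (i + 1)]) []
        ancilla_names ++ [some temp]
      else
        ancilla_names ++ [none]) acc
    = acc ++ l.map (fun g =>
        if ancilla_bits_are_possible (PySem.List.pyGetD qbit_names g []) then
          some ((PySem.List.pyRange 0 (((PySem.List.pyGetD qbit_names g []).length : Int) - 2) 1).foldl
            (fun t i => t ++ [get_ancilla_name (i + 1)]) [])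
        else none) := by
  induction l generalizing acc with
  | nil => simp
  | cons x xs ih =>
    simp only [List.foldl_cons, List.map_cons]
    rw [ih]
    by_cases h : ancilla_bits_are_possible (PySem.List.pyGetD qbit_names x []) <;> simp [h]

-- taking the first n elements of range(a, b) (n ≤ b - a) is range(a, a + n)
theorem take_pyRange_one (a b : Int) (n : Nat) (h : a + n ≤ b) :
    (PySem.List.pyRange a b 1).take n = PySem.List.pyRange a (a + n) 1 := by
  rw [PySem.List.pyRange_one a b, PySem.List.pyRange_one a (a + n), ← List.map_take, List.take_range]
  have h1 : (a + (n : Int) - a).toNat = n := by omega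
  have h2 : min n (b - a).toNat = n := by omega
  rw [h1, h2]

-- the per-graph temp list A builds, as a map over range(1, n+1)
theorem temp_eq_map_shifted (n : Int) :
    (PySem.List.pyRange 0 n 1).foldl (fun t i => t ++ [get_ancilla_name (i + 1)]) []
    = (PySem.List.pyRange 1 (n + 1) 1).map (fun i => "A" ++ PySem.Int.toStr i) := by
  rw [PySem.List.foldl_append_singleton_eq_map, List.nil_append,
      PySem.List.pyRange_one 0 n, PySem.List.pyRange_one 1 (n + 1), List.map_map, List.map_map]
  simp only [Int.sub_zero, Int.add_sub_cancel]
  apply List.map_congr_left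
  intro k _
  simp only [Function.comp, get_ancilla_name]
  congr 2
  ring

theorem get_all_ancilla_bits_per_graph_eq (graphs : List Int) (qbit_names : List (List String)) :
    get_all_ancilla_bits_per_graph graphs qbit_names
    = get_all_ancilla_bits_per_graph_alt graphs qbit_names := by
  unfold get_all_ancilla_bits_per_graph get_all_ancilla_bits_per_graph_alt
  rw [aLoop_eq_map, List.nil_append, List.map_map]
  refine List.map_congr_left ?_
  intro g hg
  simp only [Function.comp]
  by_cases h : ((PySem.List.pyGetD qbit_names g []).length : Int) - 2 > 0
  · have hb : ancilla_bits_are_possible (PySem.List.pyGetD qbit_names g []) = true := by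
      unfold ancilla_bits_are_possible; rw [if_pos h]
    rw [hb, if_pos rfl, if_pos h]
    have hmem : (((PySem.List.pyGetD qbit_names g []).length : Int) - 2) ∈
        (PySem.List.pyRange 0 graphs.length 1).map
          (fun g => ((PySem.List.pyGetD qbit_names g []).length : Int) - 2) :=
      List.mem_map_of_mem hg
    have hle : ((PySem.List.pyGetD qbit_names g []).length : Int) - 2 ≤
        (PySem.List.max? ((PySem.List.pyRange 0 graphs.length 1).map
          (fun g => ((PySem.List.pyGetD qbit_names g []).length : Int) - 2)) (fun x => x)).getD 0 := by
      cases hmax : PySem.List.max? ((PySem.List.pyRange 0 graphs.length 1).map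
          (fun g => ((PySem.List.pyGetD qbit_names g []).length : Int) - 2)) (fun x => x) with
      | none =>
        rw [PySem.List.max?_eq_none_iff] at hmax
        rw [hmax] at hmem; simp at hmem
      | some v =>
        have := PySem.List.max?_isMax hmax _ hmem
        simpa using this
    congr 1
    rw [temp_eq_map_shifted,
        PySem.List.slice_to _ (by omega : (0:Int) ≤ ((PySem.List.pyGetD qbit_names g []).length : Int) - 2),
        ← List.map_take,
        take_pyRange_one 1 _ (((PySem.List.pyGetD qbit_names g []).length : Int) - 2).toNat (by omega)]
    congr 2
    omega
  · have hb : ancilla_bits_are_possible (PySem.List.pyGetD qbit_names g []) = false := by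
      unfold ancilla_bits_are_possible; rw [if_neg h]
    rw [hb, if_neg (by simp), if_neg h]

-- ===== VERDICT (by name: the statement is the Claim_ definition above) =====
theorem get_all_ancilla_bits_per_graph_spec : Claim_equal_get_all_ancilla_bits_per_graph := by
  intro graphs qbit_names _ _
  exact get_all_ancilla_bits_per_graph_eq graphs qbit_names
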